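-- pv_equiv track=rewrite | github.com/weissio/foerdermittel-navigator | scripts/check_changed_links_gate.py | _changed_ids
-- ===== SOURCE A (Python) =====
-- def _changed_ids(base: dict[str, dict[str, str]], cur: dict[str, dict[str, str]]) -> list[str]:
--     ids = sorted(set(base) | set(cur))
--     changed = []
--     for pid in ids:
--         if pid not in base or pid not in cur:
--             changed.append(pid)
--             continue
--         if base[pid] != cur[pid]:
--             changed.append(pid)
--     return changed
-- ===== SOURCE B (Python) =====
-- def _changed_ids(base: dict[str, dict[str, str]], cur: dict[str, dict[str, str]]) -> list[str]:
--     # Two-pointer merge of the two independently sorted key lists; equal keys are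
--     # value-compared, unequal heads are keys present on one side only.
--     bs, cs = sorted(base), sorted(cur)
--     out = []
--     i = j = 0
--     while i < len(bs) and j < len(cs):
--         if bs[i] < cs[j]:
--             out.append(bs[i])
--             i += 1
--         elif cs[j] < bs[i]:
--             out.append(cs[j])
--             j += 1
--         else:
--             if base[bs[i]] != cur[cs[j]]:
--                 out.append(bs[i])
--             i += 1
--             j += 1
--     out.extend(bs[i:])
--     out.extend(cs[j:])
--     return out
-- ===== Notes on version B (the rewrite author's own statement) =====
-- stated objective: alternative
-- what changed: Replaces A's loop over the sorted union with per-key membership tests by a two-pointer merge of the two independently sorted key lists: unequal heads are one-sided keys emitted directly, equal heads are value-compared, and no union set or membership test is ever built.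
import Mathlib
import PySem

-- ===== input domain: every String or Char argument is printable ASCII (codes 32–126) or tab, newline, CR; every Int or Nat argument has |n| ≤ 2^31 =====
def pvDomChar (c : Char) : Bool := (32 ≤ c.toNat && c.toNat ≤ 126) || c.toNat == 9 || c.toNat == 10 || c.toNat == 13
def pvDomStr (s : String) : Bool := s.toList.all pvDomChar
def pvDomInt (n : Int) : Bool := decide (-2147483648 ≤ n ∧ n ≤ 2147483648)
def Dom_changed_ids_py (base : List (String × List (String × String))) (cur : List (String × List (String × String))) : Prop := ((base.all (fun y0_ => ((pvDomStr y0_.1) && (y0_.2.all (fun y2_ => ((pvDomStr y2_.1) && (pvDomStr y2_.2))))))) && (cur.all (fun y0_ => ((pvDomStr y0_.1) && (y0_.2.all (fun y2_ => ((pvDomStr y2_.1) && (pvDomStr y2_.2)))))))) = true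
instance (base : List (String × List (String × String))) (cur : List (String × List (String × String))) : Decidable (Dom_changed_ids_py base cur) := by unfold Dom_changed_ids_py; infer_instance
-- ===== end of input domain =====

-- B replaces A's loop over the sorted key union (with per-key membership tests) by a
-- two-pointer merge of the two independently sorted key lists. Objective: alternative.

-- ===== PORT A =====
-- Python's `==` on the inner dicts ignores insertion order; both Pythons compare the inner
-- dicts this way (base[pid] != cur[pid]), so both ports share this exact model of dict equality.
def pyDictEq (xs ys : List (String × String)) : Bool :=
  let dx := PySem.Dict.ofList xs
  let dy := PySem.Dict.ofList ys
  dx.size == dy.size && dx.keys.all (fun k => dx.get? k == dy.get? k)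

def changed_ids_py (base : List (String × List (String × String))) (cur : List (String × List (String × String))) : List String :=
  let db := PySem.Dict.ofList base
  let dc := PySem.Dict.ofList cur
  let ids := PySem.List.sorted (PySem.Set.union (PySem.Set.ofList db.keys) (PySem.Set.ofList dc.keys)) (fun x => x) false
  ids.foldl (fun changed pid =>
    if !(db.contains pid) || !(dc.contains pid) then changed ++ [pid]
    else if !(pyDictEq (db.getD pid []) (dc.getD pid [])) then changed ++ [pid]
    else changed) []

-- ===== PORT B =====
-- the two-pointer while loop of Source B, as structural recursion on the two sorted key lists
def mergeChanged (db dc : PySem.Dict String (List (String × String))) : List String → List String → List String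
  | [], ys => ys
  | x :: xs, [] => x :: xs
  | x :: xs, y :: ys =>
    if x < y then x :: mergeChanged db dc xs (y :: ys)
    else if y < x then y :: mergeChanged db dc (x :: xs) ys
    else if !(pyDictEq (db.getD x []) (dc.getD x [])) then x :: mergeChanged db dc xs ys
    else mergeChanged db dc xs ys

def changed_ids_py_alt (base : List (String × List (String × String))) (cur : List (String × List (String × String))) : List String :=
  let db := PySem.Dict.ofList base
  let dc := PySem.Dict.ofList cur
  mergeChanged db dc (PySem.List.sorted db.keys (fun x => x) false) (PySem.List.sorted dc.keys (fun x => x) false)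

-- ===== PRECONDITION & SPEC =====
def Spec_changed_ids_py (base : List (String × List (String × String))) (cur : List (String × List (String × String))) (out : List String) : Prop := out = changed_ids_py_alt base cur
instance (base : List (String × List (String × String))) (cur : List (String × List (String × String))) (out : List String) : Decidable (Spec_changed_ids_py base cur out) := by unfold Spec_changed_ids_py; infer_instance

-- ===== CLAIM (what is proved, stated in full; the proofs are below) =====
def Claim_equal_changed_ids_py : Prop := ∀ (base : List (String × List (String × String))) (cur : List (String × List (String × String))), Dom_changed_ids_py base cur → Spec_changed_ids_py base cur (changed_ids_py base cur)

-- ===== LEMMAS AND PROOFS =====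

-- any element of the merge comes from one of the two inputs
theorem mem_mergeChanged_sub (db dc : PySem.Dict String (List (String × String)))
    (xs ys : List String) (a : String) (h : a ∈ mergeChanged db dc xs ys) :
    a ∈ xs ∨ a ∈ ys := by
  induction xs generalizing ys with
  | nil => exact Or.inr (by simpa [mergeChanged] using h)
  | cons x xs ih =>
    induction ys with
    | nil => exact Or.inl (by simpa [mergeChanged] using h)
    | cons y ys ihy =>
      rw [mergeChanged] at h
      split_ifs at h with h1 h2 h3
      · rcases List.mem_cons.mp h with h | h
        · exact Or.inl (by simp [h])
        · rcases ih _ h with h | h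
          · exact Or.inl (List.mem_cons_of_mem _ h)
          · exact Or.inr h
      · rcases List.mem_cons.mp h with h | h
        · exact Or.inr (by simp [h])
        · rcases ihy h with h | h
          · exact Or.inl h
          · exact Or.inr (List.mem_cons_of_mem _ h)
      · rcases List.mem_cons.mp h with h | h
        · exact Or.inl (by simp [h])
        · rcases ih _ h with h | h
          · exact Or.inl (List.mem_cons_of_mem _ h)
          · exact Or.inr (List.mem_cons_of_mem _ h)
      · rcases ih _ h with h | h
        · exact Or.inl (List.mem_cons_of_mem _ h)
        · exact Or.inr (List.mem_cons_of_mem _ h)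

-- merging two strictly sorted lists yields a strictly sorted list
theorem pairwise_mergeChanged (db dc : PySem.Dict String (List (String × String)))
    (xs ys : List String) (hxs : xs.Pairwise (· < ·)) (hys : ys.Pairwise (· < ·)) :
    (mergeChanged db dc xs ys).Pairwise (· < ·) := by
  induction xs generalizing ys with
  | nil => simpa [mergeChanged] using hys
  | cons x xs ih =>
    induction ys with
    | nil => simpa [mergeChanged] using hxs
    | cons y ys ihy =>
      rw [List.pairwise_cons] at hxs hys
      rw [mergeChanged]
      split_ifs with h1 h2 h3
      · refine List.pairwise_cons.mpr ⟨?_, ih _ hxs.2 (List.pairwise_cons.mpr hys)⟩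
        intro a ha
        rcases mem_mergeChanged_sub db dc _ _ _ ha with h | h
        · exact hxs.1 a h
        · rcases List.mem_cons.mp h with h | h
          · exact h ▸ h1
          · exact lt_trans h1 (hys.1 a h)
      · refine List.pairwise_cons.mpr ⟨?_, ihy hys.2⟩
        intro a ha
        rcases mem_mergeChanged_sub db dc _ _ _ ha with h | h
        · rcases List.mem_cons.mp h with h | h
          · exact h ▸ h2
          · exact lt_trans h2 (hxs.1 a h)
        · exact hys.1 a h
      · have hxy : x = y := le_antisymm (le_of_not_gt h2) (le_of_not_gt h1)
        refine List.pairwise_cons.mpr ⟨?_, ih _ hxs.2 hys.2⟩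
        intro a ha
        rcases mem_mergeChanged_sub db dc _ _ _ ha with h | h
        · exact hxs.1 a h
        · exact hxy ▸ hys.1 a h
      · exact ih _ hxs.2 hys.2

-- membership in the merge, for strictly sorted inputs
theorem mem_mergeChanged (db dc : PySem.Dict String (List (String × String)))
    (xs ys : List String) (hxs : xs.Pairwise (· < ·)) (hys : ys.Pairwise (· < ·)) (a : String) :
    a ∈ mergeChanged db dc xs ys ↔
      ((a ∈ xs ∧ a ∉ ys) ∨ (a ∈ ys ∧ a ∉ xs) ∨
       (a ∈ xs ∧ a ∈ ys ∧ ¬ pyDictEq (db.getD a []) (dc.getD a []) = true)) := by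
  induction xs generalizing ys with
  | nil => simp [mergeChanged]
  | cons x xs ih =>
    induction ys with
    | nil => simp [mergeChanged]
    | cons y ys ihy =>
      rw [List.pairwise_cons] at hxs hys
      have hxnot : ∀ b ∈ xs, b ≠ x := fun b hb => ne_of_gt (hxs.1 b hb)
      have hynot : ∀ b ∈ ys, b ≠ y := fun b hb => ne_of_gt (hys.1 b hb)
      rw [mergeChanged]
      split_ifs with h1 h2 h3
      · -- x < y : x is not in y::ys
        have hxy : x ∉ y :: ys := by
          intro hmem
          rcases List.mem_cons.mp hmem with h | h
          · exact absurd (h ▸ h1) (lt_irrefl _)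
          · exact absurd (lt_trans h1 (hys.1 x h)) (lt_irrefl _)
        by_cases hax : a = x
        · subst hax
          refine iff_of_true List.mem_cons_self ?_
          exact Or.inl ⟨List.mem_cons_self, hxy⟩
        · rw [List.mem_cons, or_iff_right hax,
            ih _ hxs.2 (List.pairwise_cons.mpr hys)]
          constructor
          · rintro (⟨h, h'⟩ | ⟨h, h'⟩ | ⟨h, h', h''⟩)
            · exact Or.inl ⟨List.mem_cons_of_mem _ h, h'⟩
            · exact Or.inr (Or.inl ⟨h, by simp [hax, h']⟩)
            · exact Or.inr (Or.inr ⟨List.mem_cons_of_mem _ h, h', h''⟩)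
          · rintro (⟨h, h'⟩ | ⟨h, h'⟩ | ⟨h, h', h''⟩)
            · exact Or.inl ⟨(List.mem_cons.mp h).resolve_left hax, h'⟩
            · exact Or.inr (Or.inl ⟨h, fun hc => h' (List.mem_cons_of_mem _ hc)⟩)
            · exact Or.inr (Or.inr ⟨(List.mem_cons.mp h).resolve_left hax, h', h''⟩)
      · -- y < x : y is not in x::xs
        have hyx : y ∉ x :: xs := by
          intro hmem
          rcases List.mem_cons.mp hmem with h | h
          · exact absurd (h ▸ h2) (lt_irrefl _)
          · exact absurd (lt_trans h2 (hxs.1 y h)) (lt_irrefl _)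
        by_cases hay : a = y
        · subst hay
          refine iff_of_true List.mem_cons_self ?_
          exact Or.inr (Or.inl ⟨List.mem_cons_self, hyx⟩)
        · rw [List.mem_cons, or_iff_right hay, ihy hys.2]
          constructor
          · rintro (⟨h, h'⟩ | ⟨h, h'⟩ | ⟨h, h', h''⟩)
            · exact Or.inl ⟨h, by simp [hay, h']⟩
            · exact Or.inr (Or.inl ⟨List.mem_cons_of_mem _ h, h'⟩)
            · exact Or.inr (Or.inr ⟨h, List.mem_cons_of_mem _ h', h''⟩)
          · rintro (⟨h, h'⟩ | ⟨h, h'⟩ | ⟨h, h', h''⟩)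
            · exact Or.inl ⟨h, fun hc => h' (List.mem_cons_of_mem _ hc)⟩
            · exact Or.inr (Or.inl ⟨(List.mem_cons.mp h).resolve_left hay, h'⟩)
            · exact Or.inr (Or.inr ⟨h, (List.mem_cons.mp h').resolve_left hay, h''⟩)
      · -- x = y, values differ: keep x
        have hxy : x = y := le_antisymm (le_of_not_gt h2) (le_of_not_gt h1)
        subst hxy
        by_cases hax : a = x
        · subst hax
          refine iff_of_true List.mem_cons_self ?_
          exact Or.inr (Or.inr ⟨List.mem_cons_self, List.mem_cons_self, by simpa using h3⟩)
        · rw [List.mem_cons, or_iff_right hax, ih _ hxs.2 hys.2]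
          have hx1 : a ∈ x :: xs ↔ a ∈ xs := by simp [hax]
          have hx2 : a ∈ x :: ys ↔ a ∈ ys := by simp [hax]
          rw [hx1, hx2]
      · -- x = y, values equal: drop both
        have hxy : x = y := le_antisymm (le_of_not_gt h2) (le_of_not_gt h1)
        subst hxy
        have heq : pyDictEq (db.getD x []) (dc.getD x []) = true := by
          simpa using h3
        by_cases hax : a = x
        · subst hax
          rw [ih _ hxs.2 hys.2]
          have h1' : a ∉ xs := fun hc => (hxnot a hc) rfl
          have h2' : a ∉ ys := fun hc => (hynot a hc) rfl
          simp [h1', h2', heq]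
        · rw [ih _ hxs.2 hys.2]
          have hx1 : a ∈ x :: xs ↔ a ∈ xs := by simp [hax]
          have hx2 : a ∈ x :: ys ↔ a ∈ ys := by simp [hax]
          rw [hx1, hx2]

-- ===== VERDICT (by name: the statement is the Claim_ definition above) =====
theorem changed_ids_py_spec : Claim_equal_changed_ids_py := by
  intro base cur _
  unfold Spec_changed_ids_py changed_ids_py changed_ids_py_alt
  set db := PySem.Dict.ofList base with hdb
  set dc := PySem.Dict.ofList cur with hdc
  set p : String → Bool := fun pid => ((!(db.contains pid) || !(dc.contains pid)) || !(pyDictEq (db.getD pid []) (dc.getD pid []))) with hp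
  set S : PySem.Set String := PySem.Set.union (PySem.Set.ofList db.keys) (PySem.Set.ofList dc.keys) with hS
  set bs := PySem.List.sorted db.keys (fun x : String => x) false with hbs
  set cs := PySem.List.sorted dc.keys (fun x : String => x) false with hcs
  show (PySem.List.sorted S (fun x => x) false).foldl _ [] = mergeChanged db dc bs cs
  have hfun : (fun (changed : List String) pid =>
      if !(db.contains pid) || !(dc.contains pid) then changed ++ [pid]
      else if !(pyDictEq (db.getD pid []) (dc.getD pid [])) then changed ++ [pid]
      else changed) = (fun changed pid => if p pid then changed ++ [pid] else changed) := by
    funext c pid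
    simp only [hp]
    by_cases h1 : (!(db.contains pid) || !(dc.contains pid)) = true <;>
      by_cases h2 : (!(pyDictEq (db.getD pid []) (dc.getD pid []))) = true <;>
      simp [h1, h2]
  rw [hfun]
  have hfold := PySem.List.foldl_append_if p (fun x => x) (PySem.List.sorted S (fun x => x) false) []
  simp only [List.map_id_fun', id, List.nil_append] at hfold
  rw [hfold]
  -- strict sortedness of bs, cs, and of the filtered sorted union
  have hndb : db.keys.Nodup := PySem.Dict.nodup_keys_ofList base
  have hndc : dc.keys.Nodup := PySem.Dict.nodup_keys_ofList cur
  have hbs_pw : bs.Pairwise (· < ·) := by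
    have h1 := PySem.List.sorted_pairwise db.keys (fun x : String => x)
    have h2 : bs.Nodup := ((PySem.List.sorted_perm db.keys (fun x => x) false).nodup_iff).mpr hndb
    exact (h1.and h2).imp (fun h => lt_of_le_of_ne h.1 h.2)
  have hcs_pw : cs.Pairwise (· < ·) := by
    have h1 := PySem.List.sorted_pairwise dc.keys (fun x : String => x)
    have h2 : cs.Nodup := ((PySem.List.sorted_perm dc.keys (fun x => x) false).nodup_iff).mpr hndc
    exact (h1.and h2).imp (fun h => lt_of_le_of_ne h.1 h.2)
  have hndS : S.Nodup := PySem.Set.nodup_union _ _ (PySem.Set.nodup_ofList _)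
  have hndsorted : (PySem.List.sorted S (fun x : String => x) false).Nodup :=
    ((PySem.List.sorted_perm S (fun x => x) false).nodup_iff).mpr hndS
  have hLpw : ((PySem.List.sorted S (fun x : String => x) false).filter p).Pairwise (· < ·) := by
    have h1 := PySem.List.sorted_pairwise S (fun x : String => x)
    exact (((h1.and hndsorted).imp (fun h => lt_of_le_of_ne h.1 h.2)).filter p)
  have hRpw : (mergeChanged db dc bs cs).Pairwise (· < ·) :=
    pairwise_mergeChanged db dc bs cs hbs_pw hcs_pw
  -- both sides have the same members
  have hmem : ∀ a, a ∈ (PySem.List.sorted S (fun x : String => x) false).filter p ↔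
      a ∈ mergeChanged db dc bs cs := by
    intro a
    rw [mem_mergeChanged db dc bs cs hbs_pw hcs_pw]
    simp only [List.mem_filter, PySem.List.mem_sorted, hS, PySem.Set.mem_union,
      PySem.Set.mem_ofList, hbs, hcs, hp, Bool.or_eq_true, Bool.not_eq_eq_eq_not, Bool.not_true,
      ← PySem.Dict.contains_iff_mem_keys]
    by_cases h1 : db.contains a <;> by_cases h2 : dc.contains a <;>
      by_cases h3 : pyDictEq (db.getD a []) (dc.getD a []) <;> simp [h1, h2, h3]
  -- strictly sorted lists with the same members are equal
  have hperm : ((PySem.List.sorted S (fun x : String => x) false).filter p).Perm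
      (mergeChanged db dc bs cs) := by
    have hL : (List.filter p (PySem.List.sorted S (fun x : String => x) false)).Nodup :=
      hLpw.imp ne_of_lt
    have hR : (mergeChanged db dc bs cs).Nodup := hRpw.imp ne_of_lt
    rw [List.perm_ext_iff_of_nodup hL hR]
    exact hmem
  exact @List.Perm.eq_of_pairwise' String (· < ·)
    ⟨fun a b h h' => absurd h' (lt_asymm h)⟩ _ _ hLpw hRpw hperm
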